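-- pv_equiv track=rewrite | github.com/hunglaithe117-alt/sccso | batch_fetch_all_measures.py | parse_component_key
-- ===== SOURCE A (Python) =====
-- from typing import Dict, Iterable, List, Optional, Set, Tuple
--
-- def parse_component_key(component_key: str) -> Tuple[str, str]:
--     """
--     Parse component key in format {repo}_{commit_sha}
--     e.g., '19wu_19wu_011983fcf1ed6a9b6890a8e646b36704c28ad391'
--     Returns (repo, commit_sha)
--     """
--     parts = component_key.split("_")
--     if len(parts) >= 2:
--         # Find the last part that looks like a commit SHA (40 chars hex)
--         for i in range(len(parts) - 1, -1, -1):
--             if len(parts[i]) == 40 and all(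
--                 c in "0123456789abcdef" for c in parts[i].lower()
--             ):
--                 repo = "_".join(parts[:i])
--                 commit = parts[i]
--                 return repo, commit
--     # Fallback: treat everything before last underscore as repo
--     if len(parts) >= 2:
--         return "_".join(parts[:-1]), parts[-1]
--     return component_key, ""
-- ===== SOURCE B (Python) =====
-- def parse_component_key(component_key):
--     """Scan the raw string for 40-hex runs delimited by '_' (or the string's
--     ends) instead of splitting into parts: keep the start of the last such run,
--     then cut the string there; rfind-based fallback when there is none."""
--     s = component_key
--     if "_" not in s:
--         return s, ""
--     n = len(s)
--     last = -1
--     for i in range(n - 39):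
--         if ((i == 0 or s[i - 1] == "_")
--                 and (i + 40 == n or s[i + 40] == "_")
--                 and all(c in "0123456789abcdefABCDEF" for c in s[i:i + 40])):
--             last = i
--     if last >= 0:
--         return ("" if last == 0 else s[:last - 1]), s[last:last + 40]
--     j = s.rfind("_")
--     return s[:j], s[j + 1:]
-- ===== Notes on version B (the rewrite author's own statement) =====
-- stated objective: alternative
-- what changed: B never splits the key into a parts list: it scans raw character positions of the string for 40-hex runs delimited by underscores or the string ends (keeping the last start index) and slices the string directly around that index, with an rfind-based fallback, instead of A's split into parts, backward index loop over the parts and join-based reassembly.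
import Mathlib
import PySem

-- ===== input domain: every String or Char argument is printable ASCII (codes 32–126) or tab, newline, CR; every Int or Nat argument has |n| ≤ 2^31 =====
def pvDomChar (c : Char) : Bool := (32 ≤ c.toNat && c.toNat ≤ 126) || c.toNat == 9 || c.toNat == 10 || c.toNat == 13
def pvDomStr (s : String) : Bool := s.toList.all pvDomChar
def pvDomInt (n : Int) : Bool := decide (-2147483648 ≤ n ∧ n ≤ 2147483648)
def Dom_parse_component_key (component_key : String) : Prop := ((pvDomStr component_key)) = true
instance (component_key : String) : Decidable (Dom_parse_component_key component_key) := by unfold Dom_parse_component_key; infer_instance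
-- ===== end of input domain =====

-- B never splits the key into parts: it scans raw character positions for 40-hex runs
-- delimited by '_' or the string ends, keeps the last start index and slices the string
-- there, with an rfind-based fallback; objective: alternative algorithm, similar cost.

-- ===== PORT A =====
-- A: `len(parts[i]) == 40 and all(c in "0123456789abcdef" for c in parts[i].lower())`
def pvIsShaA (p : List Char) : Bool :=
  p.length == 40 && (PySem.Chars.lower p).all (fun c => ("0123456789abcdef".toList).contains c)

-- A's `for i in range(len(parts)-1, -1, -1): … return repo, commit` (early return = Option)
def pvScanA (parts : List (List Char)) : List Int → Option (String × String)
  | [] => none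
  | i :: rest =>
      if pvIsShaA (PySem.List.pyGetD parts i []) then
        some (String.ofList (PySem.Chars.join ['_'] (PySem.List.slice parts none (some i))),
              String.ofList (PySem.List.pyGetD parts i []))
      else pvScanA parts rest

def parse_component_key (component_key : String) : String × String :=
  let parts := PySem.Chars.splitOn component_key.toList ['_']
  match (if 2 ≤ parts.length then
           pvScanA parts (PySem.List.pyRange ((parts.length : Int) - 1) (-1) (-1))
         else none) with
  | some r => r
  | none =>
      if 2 ≤ parts.length then
        (String.ofList (PySem.Chars.join ['_'] (PySem.List.slice parts none (some (-1)))),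
         String.ofList (PySem.List.pyGetD parts (-1) []))
      else (component_key, "")

-- ===== PORT B =====
-- B: is position i the start of a '_'-delimited (or string-end-delimited) 40-hex run?
-- (`(i == 0 or s[i-1] == "_") and (i + 40 == n or s[i+40] == "_") and all(c in … for c in s[i:i+40])`)
def pvMatchB (L : List Char) (i : Int) : Bool :=
  (i == 0 || PySem.List.pyGet? L (i - 1) == some '_')
  && (i + 40 == (L.length : Int) || PySem.List.pyGet? L (i + 40) == some '_')
  && (PySem.List.slice L (some i) (some (i + 40))).all
       (fun c => ("0123456789abcdefABCDEF".toList).contains c)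

def parse_component_key_alt (component_key : String) : String × String :=
  let L := component_key.toList
  if PySem.Chars.isIn ['_'] L then
    -- `for i in range(n - 39): if …: last = i`
    let last := (PySem.List.pyRange 0 ((L.length : Int) - 39) 1).foldl
      (fun acc i => if pvMatchB L i then i else acc) (-1)
    if 0 ≤ last then
      ((if last == 0 then "" else String.ofList (PySem.List.slice L none (some (last - 1)))),
       String.ofList (PySem.List.slice L (some last) (some (last + 40))))
    else
      let j := PySem.Chars.rfind L ['_']
      (String.ofList (PySem.List.slice L none (some j)),
       String.ofList (PySem.List.slice L (some (j + 1)) none))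
  else (component_key, "")

-- ===== PRECONDITION & SPEC =====
def Spec_parse_component_key (component_key : String) (out : String × String) : Prop := out = parse_component_key_alt component_key
instance (component_key : String) (out : String × String) : Decidable (Spec_parse_component_key component_key out) := by unfold Spec_parse_component_key; infer_instance

-- ===== CLAIM (what is proved, stated in full; the proofs are below) =====
def Claim_equal_parse_component_key : Prop := ∀ (component_key : String), Dom_parse_component_key component_key → Spec_parse_component_key component_key (parse_component_key component_key)

-- ===== LEMMAS AND PROOFS =====

-- B's mixed-case hex test on one char / one part (proof-side abbreviations)
def pvHexB (c : Char) : Bool := ("0123456789abcdefABCDEF".toList).contains c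

def pvIsShaB (p : List Char) : Bool := p.length == 40 && p.all pvHexB

-- A's lowercase-then-test and B's mixed-case test agree on every ASCII char (checked by decide)
theorem pvCharHexLt : ∀ n : Nat, n < 123 →
    ("0123456789abcdef".toList).contains (PySem.Chars.lowerChar (Char.ofNat n))
      = pvHexB (Char.ofNat n) := by
  decide

-- … and on every char beyond ASCII both tests are false, so they agree everywhere
theorem pvCharHex (c : Char) :
    ("0123456789abcdef".toList).contains (PySem.Chars.lowerChar c) = pvHexB c := by
  by_cases h : c.toNat < 123
  · have := pvCharHexLt c.toNat h
    rwa [Char.ofNat_toNat] at this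
  · have hZ : ¬ (c ≤ 'Z') := by
      rw [Char.le_def, UInt32.le_iff_toNat_le]
      show ¬ (c.toNat ≤ 90)
      omega
    have hlow : PySem.Chars.lowerChar c = c := by
      simp [PySem.Chars.lowerChar, PySem.Chars.isupper, hZ]
    rw [hlow, pvHexB]
    have hfalse : ∀ l : List Char, l.all (fun x => decide (x.toNat < 123)) = true →
        l.contains c = false := by
      intro l hl
      cases hc : l.contains c with
      | false => rfl
      | true =>
          have := List.all_eq_true.mp hl c (List.contains_iff_mem.mp hc)
          simp at this; omega
    rw [hfalse _ (by decide), hfalse _ (by decide)]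

theorem pvIsSha_eq (p : List Char) : pvIsShaA p = pvIsShaB p := by
  simp only [pvIsShaA, pvIsShaB, PySem.Chars.lower, List.all_map]
  rw [show ((fun c => ("0123456789abcdef".toList).contains c) ∘ PySem.Chars.lowerChar)
        = pvHexB from funext pvCharHex]

-- index of the LAST element satisfying S
def pvLast (S : List Char → Bool) : List (List Char) → Option Nat
  | [] => none
  | p :: ps =>
      match pvLast S ps with
      | some t => some (t + 1)
      | none => if S p then some 0 else none

theorem pvLast_lt (S : List Char → Bool) (ps : List (List Char)) (t : Nat)
    (h : pvLast S ps = some t) : t < ps.length := by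
  induction ps generalizing t with
  | nil => simp [pvLast] at h
  | cons p ps ih =>
      simp only [pvLast] at h
      cases hL : pvLast S ps with
      | some u =>
          rw [hL] at h
          have := ih u hL
          simp at h
          simp [← h]
          omega
      | none =>
          rw [hL] at h
          by_cases hp : S p
          · simp [hp] at h; simp [← h]
          · simp [hp] at h

theorem pvLast_concat (S : List Char → Bool) (xs : List (List Char)) (x : List Char) :
    pvLast S (xs ++ [x]) = if S x then some xs.length else pvLast S xs := by
  induction xs with
  | nil => simp [pvLast]
  | cons y ys ih =>
      simp only [List.cons_append, pvLast, ih]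
      by_cases h : S x
      · simp [h]
      · simp [h]

-- the unified result formula A produces
def pvF (parts : List (List Char)) (t : Nat) : String × String :=
  (String.ofList (PySem.Chars.join ['_'] (parts.take t)),
   String.ofList (parts.getD t []))

-- A's backward early-return scan returns the LAST match over the scanned prefix
theorem pvScanA_eq (parts : List (List Char)) : ∀ (m : Nat), m < parts.length →
    pvScanA parts (PySem.List.pyRange (m : Int) (-1) (-1))
      = (pvLast pvIsShaA (parts.take (m + 1))).map (pvF parts) := by
  intro m
  induction m with
  | zero =>
      intro hm
      rw [PySem.List.pyRange_neg_one_cons (by omega)]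
      have h0 : ((0 : Nat) : Int) - 1 = -1 := by omega
      rw [h0, PySem.List.pyRange_neg_one_eq_nil (by omega)]
      have hget : parts.getD 0 [] = parts[0] := List.getD_eq_getElem _ _ hm
      simp only [pvScanA, PySem.List.pyGetD_natCast, hget]
      rw [List.take_add_one, List.getElem?_eq_getElem hm, Option.toList_some, pvLast_concat]
      by_cases hS : pvIsShaA parts[0] <;>
        simp [hS, pvLast, pvF, PySem.List.slice_to parts (le_refl (0:Int)),
          List.getElem?_eq_getElem hm]
  | succ k ih =>
      intro hm
      rw [PySem.List.pyRange_neg_one_cons (by omega)]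
      have hk : ((k + 1 : Nat) : Int) - 1 = ((k : Nat) : Int) := by push_cast; omega
      rw [hk]
      have hget : parts.getD (k + 1) [] = parts[k + 1] := List.getD_eq_getElem _ _ hm
      simp only [pvScanA, PySem.List.pyGetD_natCast, hget]
      conv_rhs => rw [List.take_add_one, List.getElem?_eq_getElem hm]
      simp only [Option.toList_some]
      rw [pvLast_concat]
      have hlen : (parts.take (k + 1)).length = k + 1 := by
        simp [List.length_take]; omega
      by_cases hS : pvIsShaA parts[k + 1]
      · rw [PySem.List.slice_to parts (by omega : (0:Int) ≤ ((k+1:Nat):Int))]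
        simp [hS, pvF, hlen, List.getElem?_eq_getElem hm]
      · simp only [hS]
        exact ih (by omega)

-- fallback helpers: parts[:-1] and parts[-1] for a nonempty list
theorem pvSliceNegOne (l : List (List Char)) (h : 1 ≤ l.length) :
    PySem.List.slice l none (some (-1)) = l.take (l.length - 1) := by
  have hne : l ≠ [] := by intro he; simp [he] at h
  simp [PySem.List.slice, PySem.List.clampIdx, hne]
  omega

theorem pvGetNegOne (l : List (List Char)) (h : 1 ≤ l.length) :
    PySem.List.pyGetD l (-1) [] = l.getD (l.length - 1) [] := by
  simp [PySem.List.pyGetD, PySem.List.pyGet?, PySem.List.pyIdx?, List.getD, h]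

-- ---------- splitOn ['_'] as a simple structural recursion ----------
def pvSplitU : List Char → List (List Char)
  | [] => [[]]
  | c :: rest =>
      if c = '_' then [] :: pvSplitU rest
      else
        match pvSplitU rest with
        | [] => [[c]]
        | q :: qs => (c :: q) :: qs

theorem pvSplitU_ne_nil (L : List Char) : pvSplitU L ≠ [] := by
  cases L with
  | nil => simp [pvSplitU]
  | cons c rest =>
      simp only [pvSplitU]
      split
      · simp
      · cases h : pvSplitU rest <;> simp

theorem pvSplitOn_go_eq (L : List Char) : ∀ (fuel : Nat) (cur : List Char)
    (acc : List (List Char)), L.length ≤ fuel →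
    PySem.Chars.splitOn.go ['_'] fuel L cur acc
      = acc.reverse ++ (match pvSplitU L with
          | [] => []
          | q :: qs => (cur.reverse ++ q) :: qs) := by
  induction L with
  | nil =>
      intro fuel cur acc _
      cases fuel <;> simp [PySem.Chars.splitOn.go, pvSplitU]
  | cons c rest ih =>
      intro fuel cur acc hf
      cases fuel with
      | zero => simp at hf
      | succ f =>
          have hr : rest.length ≤ f := by simpa using hf
          by_cases hc : c = '_'
          · subst hc
            rw [show PySem.Chars.splitOn.go ['_'] (f+1) ('_' :: rest) cur acc
                  = PySem.Chars.splitOn.go ['_'] f rest [] (cur.reverse :: acc) from by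
              simp [PySem.Chars.splitOn.go, List.isPrefixOf]]
            rw [ih f [] (cur.reverse :: acc) hr]
            cases h : pvSplitU rest with
            | nil => exact absurd h (pvSplitU_ne_nil rest)
            | cons q qs => simp [pvSplitU, h]
          · rw [show PySem.Chars.splitOn.go ['_'] (f+1) (c :: rest) cur acc
                  = PySem.Chars.splitOn.go ['_'] f rest (c :: cur) acc from by
              simp [PySem.Chars.splitOn.go, List.isPrefixOf, Ne.symm hc]]
            rw [ih f (c :: cur) acc hr]
            cases h : pvSplitU rest with
            | nil => exact absurd h (pvSplitU_ne_nil rest)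
            | cons q qs => simp [pvSplitU, h, hc]

theorem pvSplitOn_eq (L : List Char) : PySem.Chars.splitOn L ['_'] = pvSplitU L := by
  rw [PySem.Chars.splitOn, pvSplitOn_go_eq L (L.length + 1) [] [] (by omega)]
  cases h : pvSplitU L with
  | nil => exact absurd h (pvSplitU_ne_nil L)
  | cons q qs => simp

theorem pvSplitU_underscore (rest : List Char) :
    pvSplitU ('_' :: rest) = [] :: pvSplitU rest := by
  simp [pvSplitU]

theorem pvSplitU_cons (c : Char) (rest : List Char) (hc : c ≠ '_') :
    pvSplitU (c :: rest)
      = (match pvSplitU rest with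
          | [] => [[c]]
          | q :: qs => (c :: q) :: qs) := by
  simp [pvSplitU, hc]

theorem pvSplitU_free (L : List Char) : ∀ p ∈ pvSplitU L, '_' ∉ p := by
  induction L with
  | nil => simp [pvSplitU]
  | cons c rest ih =>
      by_cases hc : c = '_'
      · subst hc
        rw [pvSplitU_underscore]
        intro p hp
        rcases List.mem_cons.mp hp with hp | hp
        · simp [hp]
        · exact ih p hp
      · rw [pvSplitU_cons c rest hc]
        cases h : pvSplitU rest with
        | nil => exact absurd h (pvSplitU_ne_nil rest)
        | cons q qs =>
            intro p hp
            rcases List.mem_cons.mp hp with hp | hp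
            · subst hp
              intro hm
              rcases List.mem_cons.mp hm with hm | hm
              · exact hc hm.symm
              · exact ih q (h ▸ List.mem_cons_self) hm
            · exact ih p (h ▸ List.mem_cons_of_mem _ hp)

theorem pvSplitU_join (L : List Char) : PySem.Chars.join ['_'] (pvSplitU L) = L := by
  induction L with
  | nil => simp [pvSplitU, PySem.Chars.join, List.intercalate]
  | cons c rest ih =>
      by_cases hc : c = '_'
      · subst hc
        rw [pvSplitU_underscore]
        cases h : pvSplitU rest with
        | nil => exact absurd h (pvSplitU_ne_nil rest)
        | cons q qs =>
            rw [h] at ih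
            rw [PySem.Chars.join_cons_cons]
            simpa using ih
      · rw [pvSplitU_cons c rest hc]
        cases h : pvSplitU rest with
        | nil => exact absurd h (pvSplitU_ne_nil rest)
        | cons q qs =>
            rw [h] at ih
            cases qs with
            | nil =>
                rw [PySem.Chars.join_singleton] at ih ⊢
                simp [ih]
            | cons q2 qs2 =>
                rw [PySem.Chars.join_cons_cons] at ih ⊢
                simp [← ih]

theorem pvSplitU_no_underscore (L : List Char) (h : '_' ∉ L) : pvSplitU L = [L] := by
  induction L with
  | nil => simp [pvSplitU]
  | cons c rest ih =>
      have hc : c ≠ '_' := fun he => h (he ▸ List.mem_cons_self)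
      have hr : '_' ∉ rest := fun hm => h (List.mem_cons_of_mem _ hm)
      rw [pvSplitU_cons c rest hc, ih hr]

theorem pvSplitU_two_le (L : List Char) (h : '_' ∈ L) : 2 ≤ (pvSplitU L).length := by
  induction L with
  | nil => simp at h
  | cons c rest ih =>
      by_cases hc : c = '_'
      · subst hc
        rw [pvSplitU_underscore]
        simp only [List.length_cons]
        have := pvSplitU_ne_nil rest
        have : 1 ≤ (pvSplitU rest).length := by
          cases hh : pvSplitU rest with
          | nil => exact absurd hh this
          | cons a b => simp
        omega
      · have hr : '_' ∈ rest := by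
          rcases List.mem_cons.mp h with h | h
          · exact absurd h.symm hc
          · exact h
        rw [pvSplitU_cons c rest hc]
        cases hh : pvSplitU rest with
        | nil => exact absurd hh (pvSplitU_ne_nil rest)
        | cons q qs =>
            have := ih hr
            rw [hh] at this
            simpa using this

-- ---------- positions of parts inside the joined string ----------
def pvPos : List (List Char) → Nat → Nat
  | _, 0 => 0
  | [], _ + 1 => 0
  | p :: ps, j + 1 => p.length + 1 + pvPos ps j

-- the Nat-index form of B's match test
def pvM (L : List Char) (i : Nat) : Bool :=
  (i == 0 || L[i-1]? == some '_') && (i + 40 == L.length || L[i+40]? == some '_')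
  && ((L.drop i).take 40).all pvHexB

theorem pvPos_mono (parts : List (List Char)) : ∀ j k, j ≤ k → pvPos parts j ≤ pvPos parts k := by
  induction parts with
  | nil =>
      intro j k _
      cases j <;> cases k <;> simp [pvPos]
  | cons p ps ih =>
      intro j k hjk
      cases j with
      | zero => cases k <;> simp [pvPos]
      | succ j' =>
          cases k with
          | zero => omega
          | succ k' =>
              simp only [pvPos]
              have := ih j' k' (by omega)
              omega

theorem pvPos_add_len_le (parts : List (List Char)) : ∀ j, j < parts.length →
    pvPos parts j + (parts.getD j []).length ≤ (PySem.Chars.join ['_'] parts).length := by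
  induction parts with
  | nil => intro j hj; simp at hj
  | cons p ps ih =>
      intro j hj
      cases j with
      | zero =>
          cases ps with
          | nil => simp [pvPos, PySem.Chars.join_singleton]
          | cons q qs =>
              rw [PySem.Chars.join_cons_cons]
              simp [pvPos]
      | succ j' =>
          have hj' : j' < ps.length := by simpa using hj
          have hps : ps ≠ [] := by intro he; rw [he] at hj'; simp at hj'
          cases ps with
          | nil => simp at hj'
          | cons q qs =>
              rw [PySem.Chars.join_cons_cons]
              have := ih j' hj'
              simp only [pvPos, List.getD_cons_succ, List.length_append]
              simp at this ⊢
              omega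

theorem pvPos_pos (parts : List (List Char)) (t : Nat) (ht : 0 < t) (hlt : t < parts.length) :
    0 < pvPos parts t := by
  cases parts with
  | nil => simp at hlt
  | cons p ps =>
      cases t with
      | zero => omega
      | succ j => simp [pvPos] <;> omega


theorem pvPos_eq_zero (parts : List (List Char)) (t : Nat) (hlt : t < parts.length)
    (h : pvPos parts t = 0) : t = 0 := by
  by_cases ht : 0 < t
  · have := pvPos_pos parts t ht hlt
    omega
  · omega


theorem pvPos_zero (ps : List (List Char)) : pvPos ps 0 = 0 := by
  cases ps <;> rfl

-- the port's Int-index match test equals the Nat-index form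
theorem pvMatchB_eq (L : List Char) (k : Nat) : pvMatchB L (k : Int) = pvM L k := by
  have hfun : (fun c => ("0123456789abcdefABCDEF".toList).contains c) = pvHexB := rfl
  have hseg : PySem.List.slice L (some (k : Int)) (some ((k : Int) + 40))
      = (L.drop k).take 40 := by
    have h40 : ((k : Int) + 40) = ((k : Int) + ((40 : Nat) : Int)) := by norm_cast
    rw [h40, PySem.List.slice_natCast_add]
  have hget : PySem.List.pyGet? L ((k : Int) + 40) = L[k + 40]? := by
    have : ((k : Int) + 40) = (((k + 40 : Nat)) : Int) := by push_cast; ring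
    rw [this, PySem.List.pyGet?_natCast]
  have hb2 : ((k : Int) + 40 == (L.length : Int)) = (k + 40 == L.length) := by
    rw [Bool.eq_iff_iff]
    simp only [beq_iff_eq]
    omega
  have hb1 : ((k : Int) == 0) = (k == 0) := by
    rw [Bool.eq_iff_iff]
    simp only [beq_iff_eq]
    omega
  cases k with
  | zero =>
      simp only [pvMatchB, pvM, hseg, hget, hb2, hb1, hfun]
      simp
  | succ k' =>
      have hg1 : PySem.List.pyGet? L (((k' + 1 : Nat) : Int) - 1) = L[k' + 1 - 1]? := by
        have : (((k' + 1 : Nat) : Int) - 1) = ((k' : Nat) : Int) := by push_cast; ring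
        rw [this, PySem.List.pyGet?_natCast]
        norm_num
      simp only [pvMatchB, pvM, hseg, hget, hb2, hg1, hb1, hfun]

-- no character of a '_'-free list reads as '_'
theorem pvNoUnd (p : List Char) (hfree : '_' ∉ p) (k : Nat) :
    p[k]? ≠ some '_' := by
  intro h
  exact hfree (List.mem_of_getElem? h)

-- THE BRIDGE: a position matches iff it is the start of a 40-hex part
theorem pvBridge : ∀ (parts : List (List Char)), parts ≠ [] →
    (∀ p ∈ parts, '_' ∉ p) →
    ∀ i, i + 40 ≤ (PySem.Chars.join ['_'] parts).length →
      (pvM (PySem.Chars.join ['_'] parts) i = true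
        ↔ ∃ j, j < parts.length ∧ i = pvPos parts j ∧ pvIsShaB (parts.getD j []) = true) := by
  intro parts
  induction parts with
  | nil => intro h; exact absurd rfl h
  | cons p ps ih =>
      intro _ hfree i hle
      have hfp : '_' ∉ p := hfree p List.mem_cons_self
      cases ps with
      | nil =>
          -- singleton: the run must be the whole (40-char) string
          rw [PySem.Chars.join_singleton] at hle ⊢
          constructor
          · intro hM
            simp only [pvM, Bool.and_eq_true, Bool.or_eq_true, beq_iff_eq] at hM
            obtain ⟨⟨h1, h2⟩, h3⟩ := hM
            have hi0 : i = 0 := by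
              rcases h1 with h1 | h1
              · exact h1
              · exact absurd h1 (pvNoUnd p hfp (i - 1))
            subst hi0
            have h40 : p.length = 40 := by
              rcases h2 with h2 | h2
              · omega
              · exact absurd h2 (pvNoUnd p hfp 40)
            refine ⟨0, by simp, rfl, ?_⟩
            rw [List.drop_zero, List.take_of_length_le (by omega)] at h3
            simp [pvIsShaB, h40, h3]
          · rintro ⟨j, hj, hpos, hsha⟩
            have hj0 : j = 0 := by simp at hj; omega
            subst hj0
            have hi0 : i = 0 := by simpa [pvPos] using hpos
            subst hi0
            simp only [List.getD_cons_zero, pvIsShaB, Bool.and_eq_true, beq_iff_eq] at hsha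
            simp [pvM, hsha.1, List.take_of_length_le (le_of_eq hsha.1), hsha.2]
      | cons q qs =>
          set J := PySem.Chars.join ['_'] (q :: qs) with hJdef
          have hJ : PySem.Chars.join ['_'] (p :: q :: qs) = (p ++ ['_']) ++ J := by
            rw [PySem.Chars.join_cons_cons]
          rw [hJ] at hle ⊢
          have hlenL : ((p ++ ['_']) ++ J).length = p.length + 1 + J.length := by simp; omega
          by_cases hi0 : i = 0
          · -- start of the FIRST part
            subst hi0
            have hEx : (∃ j, j < (p :: q :: qs).length ∧ 0 = pvPos (p :: q :: qs) j
                ∧ pvIsShaB ((p :: q :: qs).getD j []) = true) ↔ pvIsShaB p = true := by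
              constructor
              · rintro ⟨j, hj, hpos, hsha⟩
                have := pvPos_eq_zero (p :: q :: qs) j hj hpos.symm
                subst this
                simpa using hsha
              · intro h
                exact ⟨0, by simp, rfl, by simpa using h⟩
            rw [hEx]
            have hsep : ((p ++ ['_']) ++ J)[p.length]? = some '_' := by
              rw [List.getElem?_append_left (by simp),
                List.getElem?_append_right (by omega)]
              simp
            by_cases h40 : p.length = 40
            · have hc2 : ((p ++ ['_']) ++ J)[0 + 40]? = some '_' := by
                rw [Nat.zero_add, ← h40]; exact hsep
              have hc3 : (((p ++ ['_']) ++ J).drop 0).take 40 = p := by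
                rw [List.drop_zero, List.append_assoc, ← h40, List.take_left' rfl]
              constructor
              · intro hM
                simp only [pvM, hc2, hc3, Bool.and_eq_true] at hM
                simp [pvIsShaB, h40, hM.2]
              · intro h
                simp only [pvIsShaB, Bool.and_eq_true, beq_iff_eq] at h
                simp only [pvM, hc2, hc3]
                simp [h.2]
            · constructor
              · intro hM
                exfalso
                simp only [pvM, Bool.and_eq_true, Bool.or_eq_true, beq_iff_eq] at hM
                obtain ⟨⟨h1, h2⟩, h3⟩ := hM
                by_cases hlt : p.length < 40
                · -- the 40-window crosses the separator: '_' is not hex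
                  have hin : '_' ∈ ((((p ++ ['_']) ++ J).drop 0).take 40) := by
                    rw [List.drop_zero]
                    have : (((p ++ ['_']) ++ J).take 40)[p.length]? = some '_' := by
                      rw [List.getElem?_take, if_pos hlt]; exact hsep
                    exact List.mem_of_getElem? this
                  have := List.all_eq_true.mp h3 '_' hin
                  simp [pvHexB] at this
                · -- the window ends inside the first part: no right boundary
                  rcases h2 with h2 | h2
                  · rw [hlenL] at h2; omega
                  · rw [Nat.zero_add, List.getElem?_append_left (by simp; omega),
                      List.getElem?_append_left (by omega)] at h2
                    exact pvNoUnd p hfp 40 h2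
              · intro h
                exfalso
                simp only [pvIsShaB, Bool.and_eq_true, beq_iff_eq] at h
                exact h40 h.1
          · by_cases hile : i ≤ p.length
            · -- strictly inside the first part: no left boundary
              constructor
              · intro hM
                exfalso
                simp only [pvM, Bool.and_eq_true, Bool.or_eq_true, beq_iff_eq] at hM
                obtain ⟨⟨h1, h2⟩, h3⟩ := hM
                rcases h1 with h1 | h1
                · exact hi0 h1
                · rw [List.getElem?_append_left (by simp; omega),
                    List.getElem?_append_left (by omega)] at h1
                  exact pvNoUnd p hfp (i - 1) h1
              · rintro ⟨j, hj, hpos, hsha⟩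
                exfalso
                cases j with
                | zero => exact hi0 (by simpa [pvPos] using hpos)
                | succ j' =>
                    simp only [pvPos] at hpos
                    omega
            · -- inside the tail: shift by |p| + 1 and use the IH
              have hip : p.length + 1 ≤ i := by omega
              set i' := i - (p.length + 1) with hi'
              have hieq : i = (p ++ ['_']).length + i' := by simp; omega
              have hM : pvM ((p ++ ['_']) ++ J) i = pvM J i' := by
                have hc1 : (i == 0 || ((p ++ ['_']) ++ J)[i-1]? == some '_')
                    = (i' == 0 || J[i'-1]? == some '_') := by
                  by_cases hz : i' = 0
                  · have : ((p ++ ['_']) ++ J)[i-1]? = some '_' := by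
                      have hieq1 : i - 1 = p.length := by omega
                      rw [hieq1, List.getElem?_append_left (by simp),
                        List.getElem?_append_right (by omega)]
                      simp
                    simp at this
                    simp [this, hz]
                  · have : ((p ++ ['_']) ++ J)[i-1]? = J[i'-1]? := by
                      rw [List.getElem?_append_right (by simp; omega)]
                      congr 1
                      simp; omega
                    rw [this]
                    have h1 : (i == 0) = false := by simp [hi0]
                    have h2 : (i' == 0) = false := by simp [hz]
                    rw [h1, h2]
                rw [pvM, pvM, hc1]
                have hc2a : (i + 40 == ((p ++ ['_']) ++ J).length) = (i' + 40 == J.length) := by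
                  rw [Bool.eq_iff_iff]
                  simp only [beq_iff_eq, hlenL]
                  omega
                have hc2b : ((p ++ ['_']) ++ J)[i + 40]? = J[i' + 40]? := by
                  rw [List.getElem?_append_right (by simp; omega)]
                  congr 1
                  simp; omega
                have hc3 : ((p ++ ['_']) ++ J).drop i = J.drop i' := by
                  rw [hieq, List.drop_length_add_append]
                rw [hc2a, hc2b, hc3]
              rw [hM]
              have hle' : i' + 40 ≤ J.length := by
                rw [hlenL] at hle; omega
              rw [ih (by simp) (fun x hx => hfree x (List.mem_cons_of_mem _ hx)) i' hle']
              constructor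
              · rintro ⟨j', hj', hpos', hsha'⟩
                refine ⟨j' + 1, by simpa using hj', ?_, by simpa using hsha'⟩
                simp only [pvPos]
                omega
              · rintro ⟨j, hj, hpos, hsha⟩
                cases j with
                | zero =>
                    exfalso
                    exact hi0 (by simpa [pvPos] using hpos)
                | succ j' =>
                    refine ⟨j', by simpa using hj, ?_, by simpa using hsha⟩
                    simp only [pvPos] at hpos
                    omega


-- ---------- B's keep-last fold over positions ----------
def pvLastPos (P : Nat → Bool) : Nat → Option Nat
  | 0 => none
  | m + 1 => if P m then some m else pvLastPos P m

theorem pvFoldLastPos (P : Int → Bool) (m : Nat) :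
    (PySem.List.pyRange 0 (m : Int) 1).foldl (fun acc i => if P i then i else acc) (-1)
      = (match pvLastPos (fun k => P (k : Int)) m with
          | some t => ((t : Nat) : Int)
          | none => -1) := by
  induction m with
  | zero => simp [PySem.List.pyRange_one_eq_nil, pvLastPos]
  | succ m ih =>
      have hcast : ((m + 1 : Nat) : Int) = (m : Int) + 1 := by push_cast; ring
      rw [hcast, PySem.List.pyRange_one_succ_right (by positivity), List.foldl_append]
      simp only [List.foldl_cons, List.foldl_nil, ih, pvLastPos]
      by_cases hP : P (m : Int)
      · simp [hP]
      · cases h : pvLastPos (fun k => P (k : Int)) m <;> simp [hP]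

theorem pvLastPos_none_iff (P : Nat → Bool) (m : Nat) :
    pvLastPos P m = none ↔ ∀ i < m, P i = false := by
  induction m with
  | zero => simp [pvLastPos]
  | succ m ih =>
      simp only [pvLastPos]
      by_cases hP : P m
      · simp [hP]
        exact ⟨m, by omega, hP⟩
      · simp only [if_neg hP, ih]
        constructor
        · intro h i hi
          by_cases him : i = m
          · subst him; exact Bool.eq_false_iff.mpr hP
          · exact h i (by omega)
        · intro h i hi
          exact h i (by omega)

theorem pvLastPos_eq_some (P : Nat → Bool) (m t : Nat) (ht : t < m) (hP : P t = true)
    (hmax : ∀ i, t < i → i < m → P i = false) : pvLastPos P m = some t := by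
  induction m with
  | zero => omega
  | succ m ih =>
      simp only [pvLastPos]
      by_cases htm : t = m
      · subst htm; simp [hP]
      · have hPm : P m = false := hmax m (by omega) (by omega)
        rw [if_neg (by simp [hPm])]
        exact ih (by omega) (fun i h1 h2 => hmax i h1 (by omega))

-- ---------- pvLast (A side) as "last matching index" ----------
theorem pvLast_none_aux (S : List Char → Bool) (ps : List (List Char))
    (h : pvLast S ps = none) : ∀ j < ps.length, S (ps.getD j []) = false := by
  induction ps with
  | nil => intro j hj; simp at hj
  | cons p ps ih =>
      intro j hj
      simp only [pvLast] at h
      cases hL : pvLast S ps with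
      | some u => rw [hL] at h; simp at h
      | none =>
          rw [hL] at h
          by_cases hp : S p
          · simp [hp] at h
          · cases j with
            | zero => simpa using Bool.eq_false_iff.mpr hp
            | succ j' =>
                simp only [List.getD_cons_succ]
                exact ih hL j' (by simpa using hj)

theorem pvLast_getD (S : List Char → Bool) (ps : List (List Char)) (t : Nat)
    (h : pvLast S ps = some t) : S (ps.getD t []) = true := by
  induction ps generalizing t with
  | nil => simp [pvLast] at h
  | cons p ps ih =>
      simp only [pvLast] at h
      cases hL : pvLast S ps with
      | some u =>
          rw [hL] at h
          simp at h
          rw [← h]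
          simpa using ih u hL
      | none =>
          rw [hL] at h
          by_cases hp : S p
          · simp [hp] at h; simp [← h, hp]
          · simp [hp] at h

theorem pvLast_max (S : List Char → Bool) (ps : List (List Char)) (t : Nat)
    (h : pvLast S ps = some t) : ∀ j, t < j → j < ps.length → S (ps.getD j []) = false := by
  induction ps generalizing t with
  | nil => simp [pvLast] at h
  | cons p ps ih =>
      intro j htj hj
      simp only [pvLast] at h
      cases hL : pvLast S ps with
      | some u =>
          rw [hL] at h
          simp at h
          cases j with
          | zero => omega
          | succ j' =>
              simp only [List.getD_cons_succ]
              exact ih u hL j' (by omega) (by simpa using hj)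
      | none =>
          rw [hL] at h
          by_cases hp : S p
          · simp [hp] at h
            cases j with
            | zero => omega
            | succ j' =>
                simp only [List.getD_cons_succ]
                have := pvLast_none_aux S ps hL j' (by simpa using hj)
                exact this
          · simp [hp] at h

theorem pvLast_none (S : List Char → Bool) (ps : List (List Char))
    (h : pvLast S ps = none) : ∀ j < ps.length, S (ps.getD j []) = false :=
  pvLast_none_aux S ps h

-- ---------- slices of the joined string ----------
theorem pvJoin_drop_pos (parts : List (List Char)) : ∀ t, t < parts.length →
    (PySem.Chars.join ['_'] parts).drop (pvPos parts t)
      = PySem.Chars.join ['_'] (parts.drop t) := by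
  induction parts with
  | nil => intro t ht; simp at ht
  | cons p ps ih =>
      intro t ht
      cases t with
      | zero => simp [pvPos]
      | succ j =>
          have hj : j < ps.length := by simpa using ht
          cases ps with
          | nil => simp at hj
          | cons q qs =>
              rw [PySem.Chars.join_cons_cons]
              have harr : p ++ ['_'] ++ PySem.Chars.join ['_'] (q :: qs)
                  = (p ++ ['_']) ++ PySem.Chars.join ['_'] (q :: qs) := by simp
              rw [harr]
              have hlen : pvPos (p :: q :: qs) (j + 1)
                  = (p ++ ['_']).length + pvPos (q :: qs) j := by
                simp [pvPos] <;> omega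
              rw [hlen, List.drop_length_add_append, ih j hj, List.drop_succ_cons]

theorem pvJoin_take_pos (parts : List (List Char)) : ∀ t, 0 < t → t < parts.length →
    (PySem.Chars.join ['_'] parts).take (pvPos parts t - 1)
      = PySem.Chars.join ['_'] (parts.take t) := by
  induction parts with
  | nil => intro t _ ht; simp at ht
  | cons p ps ih =>
      intro t ht0 ht
      cases t with
      | zero => omega
      | succ j =>
          have hj : j < ps.length := by simpa using ht
          cases ps with
          | nil => simp at hj
          | cons q qs =>
              rw [PySem.Chars.join_cons_cons]
              cases j with
              | zero =>
                  have hpos : pvPos (p :: q :: qs) 1 - 1 = p.length := by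
                    simp [pvPos]
                  rw [hpos]
                  have : p ++ ['_'] ++ PySem.Chars.join ['_'] (q :: qs)
                      = p ++ (['_'] ++ PySem.Chars.join ['_'] (q :: qs)) := by simp
                  rw [this, List.take_left' rfl]
                  simp [PySem.Chars.join_singleton]
              | succ j' =>
                  have hj' : j' < qs.length := by simpa using hj
                  have hq : 0 < pvPos (q :: qs) (j' + 1) := by
                    simp [pvPos] <;> omega
                  have hpos : pvPos (p :: q :: qs) (j' + 1 + 1) - 1
                      = (p ++ ['_']).length + (pvPos (q :: qs) (j' + 1) - 1) := by
                    simp [pvPos] <;> omega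
                  have harr : p ++ ['_'] ++ PySem.Chars.join ['_'] (q :: qs)
                      = (p ++ ['_']) ++ PySem.Chars.join ['_'] (q :: qs) := by simp
                  rw [harr, hpos, List.take_length_add_append, ih (j' + 1) (by omega) hj]
                  have htk : (p :: q :: qs).take (j' + 1 + 1) = p :: (q :: qs).take (j' + 1) := rfl
                  rw [htk]
                  cases hqq : (q :: qs).take (j' + 1) with
                  | nil => simp at hqq
                  | cons x xs => rw [PySem.Chars.join_cons_cons]

theorem pvJoin_seg (parts : List (List Char)) (t : Nat) (hlt : t < parts.length)
    (hlen : (parts.getD t []).length = 40) :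
    ((PySem.Chars.join ['_'] parts).drop (pvPos parts t)).take 40 = parts.getD t [] := by
  rw [pvJoin_drop_pos parts t hlt, List.drop_eq_getElem_cons hlt]
  rw [List.getD_eq_getElem parts [] hlt] at hlen ⊢
  cases hd : parts.drop (t + 1) with
  | nil =>
      rw [PySem.Chars.join_singleton, ← hlen, List.take_length]
  | cons x xs =>
      rw [PySem.Chars.join_cons_cons, ← hlen]
      have : parts[t] ++ ['_'] ++ PySem.Chars.join ['_'] (x :: xs)
          = parts[t] ++ (['_'] ++ PySem.Chars.join ['_'] (x :: xs)) := by simp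
      rw [this, List.take_left' rfl]

-- join decomposes at any internal separator
theorem pvJoin_decomp (parts : List (List Char)) : ∀ t, 0 < t → t < parts.length →
    PySem.Chars.join ['_'] parts
      = PySem.Chars.join ['_'] (parts.take t) ++ '_' :: PySem.Chars.join ['_'] (parts.drop t) := by
  induction parts with
  | nil => intro t _ ht; simp at ht
  | cons p ps ih =>
      intro t ht0 ht
      cases t with
      | zero => omega
      | succ j =>
          have hj : j < ps.length := by simpa using ht
          cases ps with
          | nil => simp at hj
          | cons q qs =>
              rw [PySem.Chars.join_cons_cons]
              cases j with
              | zero => simp [PySem.Chars.join_singleton]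
              | succ j' =>
                  rw [ih (j' + 1) (by omega) hj]
                  have htk : (p :: q :: qs).take (j' + 1 + 1) = p :: (q :: qs).take (j' + 1) := rfl
                  rw [htk, List.drop_succ_cons]
                  cases hqq : (q :: qs).take (j' + 1) with
                  | nil => simp at hqq
                  | cons x xs => rw [PySem.Chars.join_cons_cons]; simp

theorem pvPrefixU (xs : List Char) :
    List.isPrefixOf ['_'] xs = (xs.head? == some '_') := by
  cases xs <;> simp [List.isPrefixOf, eq_comm]

theorem pvRfindGo (L : List Char) (j0 : Nat) (hget : L[j0]? = some '_')
    (hmax : ∀ k, j0 < k → L[k]? ≠ some '_') :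
    ∀ m, j0 ≤ m → PySem.Chars.rfind.go L ['_'] m = (j0 : Int) := by
  intro m
  induction m with
  | zero =>
      intro hm
      have hj0 : j0 = 0 := by omega
      subst hj0
      have hh : L.head? = some '_' := by
        rw [List.head?_eq_getElem?]; exact hget
      have : List.isPrefixOf ['_'] L = true := by
        rw [pvPrefixU, hh]; rfl
      simp [PySem.Chars.rfind.go, this]
  | succ m ih =>
      intro hm
      by_cases he : j0 = m + 1
      · subst he
        have : List.isPrefixOf ['_'] (L.drop (m + 1)) = true := by
          rw [pvPrefixU, List.head?_drop, hget]; rfl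
        simp [PySem.Chars.rfind.go, this]
      · have hlt : j0 ≤ m := by omega
        have : List.isPrefixOf ['_'] (L.drop (m + 1)) = false := by
          rw [pvPrefixU, List.head?_drop]
          have := hmax (m + 1) (by omega)
          simp [this]
        simp [PySem.Chars.rfind.go, this, ih hlt]

-- rfind of '_' = position of the LAST separator
theorem pvRfind_eq (parts : List (List Char)) (h2 : 2 ≤ parts.length)
    (hfree : ∀ p ∈ parts, '_' ∉ p) :
    PySem.Chars.rfind (PySem.Chars.join ['_'] parts) ['_']
      = ((PySem.Chars.join ['_'] (parts.take (parts.length - 1))).length : Int) := by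
  have hd := pvJoin_decomp parts (parts.length - 1) (by omega) (by omega)
  set A0 := PySem.Chars.join ['_'] (parts.take (parts.length - 1)) with hA0
  set B0 := PySem.Chars.join ['_'] (parts.drop (parts.length - 1)) with hB0
  have hBfree : '_' ∉ B0 := by
    have hdrop : parts.drop (parts.length - 1) = [parts.getD (parts.length - 1) []] := by
      rw [List.drop_eq_getElem_cons (by omega), List.getD_eq_getElem parts [] (by omega)]
      have h1 : parts.length - 1 + 1 = parts.length := by omega
      rw [h1, List.drop_length]
    rw [hB0, hdrop, PySem.Chars.join_singleton]
    exact hfree _ (List.getD_eq_getElem parts [] (by omega : parts.length - 1 < parts.length) ▸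
      List.getElem_mem _)
  have hget : (PySem.Chars.join ['_'] parts)[A0.length]? = some '_' := by
    rw [hd]
    rw [List.getElem?_append_right (by omega)]
    simp
  have hmax : ∀ k, A0.length < k → (PySem.Chars.join ['_'] parts)[k]? ≠ some '_' := by
    intro k hk
    rw [hd]
    rw [List.getElem?_append_right (by omega)]
    have : k - A0.length = (k - A0.length - 1) + 1 := by omega
    rw [this]
    simp only [List.getElem?_cons_succ]
    intro hc
    exact hBfree (List.mem_of_getElem? hc)
  have hlen : A0.length ≤ (PySem.Chars.join ['_'] parts).length := by
    rw [hd]; simp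
  rw [PySem.Chars.rfind]
  exact pvRfindGo _ A0.length hget hmax _ hlen


-- ===== VERDICT (by name: the statement is the Claim_ definition above) =====
-- a slice [k : k+40] of a string is take-after-drop
theorem pvSegSlice (L : List Char) (k : Nat) :
    PySem.List.slice L (some (k : Int)) (some ((k : Int) + 40)) = (L.drop k).take 40 := by
  have h40 : ((k : Int) + 40) = ((k : Int) + ((40 : Nat) : Int)) := by norm_cast
  rw [h40, PySem.List.slice_natCast_add]

theorem parse_component_key_spec : Claim_equal_parse_component_key := by
  intro ck _
  unfold Spec_parse_component_key parse_component_key parse_component_key_alt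
  simp only []
  rw [pvSplitOn_eq]
  set L := ck.toList with hL
  set parts := pvSplitU L with hparts
  have hfree : ∀ p ∈ parts, '_' ∉ p := pvSplitU_free L
  have hne : parts ≠ [] := pvSplitU_ne_nil L
  have hJ : PySem.Chars.join ['_'] parts = L := pvSplitU_join L
  have hpred : (fun k : Nat => pvMatchB L (k : Int)) = pvM L := funext (pvMatchB_eq L)
  by_cases hu : PySem.Chars.isIn ['_'] L = true
  · -- the key contains an underscore: both sides really search
    have hmem : '_' ∈ L := by
      have hinf := (PySem.Chars.isIn_iff_infix ['_'] L).mp hu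
      exact (List.singleton_infix_iff '_' L).mp hinf
    have h2 : 2 ≤ parts.length := pvSplitU_two_le L hmem
    rw [if_pos h2, if_pos hu]
    have hn1 : ((parts.length : Int) - 1) = ((parts.length - 1 : Nat) : Int) := by
      omega
    rw [hn1, pvScanA_eq parts (parts.length - 1) (by omega)]
    have htake : parts.take ((parts.length - 1) + 1) = parts := by
      rw [show parts.length - 1 + 1 = parts.length from by omega, List.take_length]
    rw [htake]
    cases hLast : pvLast pvIsShaA parts with
    | some t =>
        have htlt := pvLast_lt _ _ _ hLast
        have hShaB : pvIsShaB (parts.getD t []) = true := by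
          rw [← pvIsSha_eq]; exact pvLast_getD _ _ _ hLast
        have hlen40 : (parts.getD t []).length = 40 := by
          simp only [pvIsShaB, Bool.and_eq_true, beq_iff_eq] at hShaB
          exact hShaB.1
        have hposle : pvPos parts t + 40 ≤ L.length := by
          have := pvPos_add_len_le parts t htlt
          rw [hJ, hlen40] at this
          omega
        set m := L.length - 39 with hm
        have hbound : ((L.length : Int) - 39) = ((m : Nat) : Int) := by omega
        rw [hbound, pvFoldLastPos (pvMatchB L) m, hpred]
        have hlp : pvLastPos (pvM L) m = some (pvPos parts t) := by
          apply pvLastPos_eq_some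
          · omega
          · rw [← hJ]
            exact (pvBridge parts hne hfree _ (by rw [hJ]; omega)).mpr ⟨t, htlt, rfl, hShaB⟩
          · intro i hti him
            by_contra hMne
            rw [Bool.not_eq_false] at hMne
            have hbr := (pvBridge parts hne hfree i (by rw [hJ]; omega)).mp
              (by rw [hJ]; exact hMne)
            obtain ⟨j, hj, hij, hSha⟩ := hbr
            by_cases hjt : j ≤ t
            · have := pvPos_mono parts j t hjt
              omega
            · have hf := pvLast_max pvIsShaA parts t hLast j (by omega) hj
              rw [pvIsSha_eq] at hf
              rw [hf] at hSha
              exact absurd hSha (by simp)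
        rw [hlp]
        rw [if_pos (by positivity : (0 : Int) ≤ ((pvPos parts t : Nat) : Int))]
        simp only [Option.map_some]
        by_cases ht0 : t = 0
        · subst ht0
          have hp0 : pvPos parts 0 = 0 := pvPos_zero parts
          rw [hp0]
          have hseg := pvJoin_seg parts 0 htlt hlen40
          rw [hJ, hp0] at hseg
          have hseg0 : PySem.List.slice L (some (0 : Int)) (some ((0 : Int) + 40))
              = (L.drop 0).take 40 := by
            have h00 := pvSegSlice L 0
            simpa using h00
          simp only [pvF]
          simp [PySem.Chars.join_nil]
          have hsl : PySem.List.slice L none (some (40 : Int)) = L.take 40 := by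
            have hc : ((40 : Nat) : Int) = (40 : Int) := by norm_num
            rw [← hc, PySem.List.slice_to_natCast]
          rw [hsl]
          simp only [List.drop_zero] at hseg
          rw [hseg]
          simp [List.getD]
        · have htpos : 0 < pvPos parts t := pvPos_pos parts t (by omega) htlt
          have hb0 : (((pvPos parts t : Nat) : Int) == 0) = false := by
            simp only [beq_eq_false_iff_ne, ne_eq]
            omega
          rw [hb0]
          simp only [Bool.false_eq_true, if_false, pvF, pvSegSlice L (pvPos parts t)]
          have hseg := pvJoin_seg parts t htlt hlen40
          rw [hJ] at hseg
          rw [hseg]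
          have hc1 : (((pvPos parts t : Nat) : Int) - 1) = ((pvPos parts t - 1 : Nat) : Int) := by
            omega
          rw [hc1, PySem.List.slice_to_natCast]
          have htk := pvJoin_take_pos parts t (by omega) htlt
          rw [hJ] at htk
          rw [htk]
    | none =>
        have hfold : (PySem.List.pyRange 0 ((L.length : Int) - 39) 1).foldl
            (fun acc i => if pvMatchB L i then i else acc) (-1) = -1 := by
          by_cases h39 : L.length ≤ 39
          · rw [PySem.List.pyRange_one_eq_nil (by omega)]
            rfl
          · set m := L.length - 39 with hm
            have hbound : ((L.length : Int) - 39) = ((m : Nat) : Int) := by omega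
            rw [hbound, pvFoldLastPos (pvMatchB L) m, hpred]
            have : pvLastPos (pvM L) m = none := by
              rw [pvLastPos_none_iff]
              intro i hi
              by_contra hMne
              rw [Bool.not_eq_false] at hMne
              have hbr := (pvBridge parts hne hfree i (by rw [hJ]; omega)).mp
                (by rw [hJ]; exact hMne)
              obtain ⟨j, hj, hij, hSha⟩ := hbr
              have hf := pvLast_none pvIsShaA parts hLast j hj
              rw [pvIsSha_eq] at hf
              rw [hf] at hSha
              exact absurd hSha (by simp)
            rw [this]
        rw [hfold, if_neg (show ¬ ((0 : Int) ≤ -1) by norm_num)]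
        simp only [Option.map_none]
        rw [if_pos h2, pvSliceNegOne parts (by omega), pvGetNegOne parts (by omega)]
        have hrf : PySem.Chars.rfind L ['_']
            = ((PySem.Chars.join ['_'] (parts.take (parts.length - 1))).length : Int) := by
          rw [← hJ]
          exact pvRfind_eq parts h2 hfree
        have hd := pvJoin_decomp parts (parts.length - 1) (by omega) (by omega)
        rw [hJ] at hd
        set A0 := PySem.Chars.join ['_'] (parts.take (parts.length - 1)) with hA0
        set B0 := PySem.Chars.join ['_'] (parts.drop (parts.length - 1)) with hB0
        have hdropP : parts.drop (parts.length - 1) = [parts.getD (parts.length - 1) []] := by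
          rw [List.drop_eq_getElem_cons (by omega), List.getD_eq_getElem parts [] (by omega)]
          have h1 : parts.length - 1 + 1 = parts.length := by omega
          rw [h1, List.drop_length]
        have hB0' : B0 = parts.getD (parts.length - 1) [] := by
          rw [hB0, hdropP, PySem.Chars.join_singleton]
        rw [hrf]
        rw [PySem.List.slice_to_natCast]
        have hc1 : ((A0.length : Int) + 1) = ((A0.length + 1 : Nat) : Int) := by omega
        rw [hc1, PySem.List.slice_from_natCast]
        have htkA : L.take A0.length = A0 := by
          rw [hd]
          have : A0 ++ '_' :: B0 = A0 ++ ('_' :: B0) := rfl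
          rw [this, List.take_left]
        have hdpB : L.drop (A0.length + 1) = B0 := by
          rw [hd]
          have : A0 ++ '_' :: B0 = (A0 ++ ['_']) ++ B0 := by simp
          rw [this]
          exact List.drop_left' (by simp)
        rw [htkA, hdpB, hB0']
  · -- no underscore: both return (key, "")
    have hnm : '_' ∉ L := by
      intro hm
      exact hu ((PySem.Chars.isIn_iff_infix ['_'] L).mpr ((List.singleton_infix_iff '_' L).mpr hm))
    have h1 : parts = [L] := pvSplitU_no_underscore L hnm
    rw [if_neg hu, h1]
    norm_num
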